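-- pv_equiv track=rewrite | github.com/PaperBackPear3/adventofcode | 2023/day7/main.py | get_player_rank_in_game
-- ===== SOURCE A (Python) =====
-- def get_hand_type(cards):
--     # 7 possible cases
--     cards_copy = cards
--     cards_occurencies_dict = {i: cards_copy.count(i) for i in cards_copy}
--     match len(cards_occurencies_dict):
--         case 1:  # all cards are the same
--             return 7
--         case 2:  # can be four of a kind or full
--             for key in cards_occurencies_dict:
--                 if cards_occurencies_dict[key] == 4:
--                     return 6
--                 elif cards_occurencies_dict[key] == 3:
--                     return 5
--         case 3:  # can be three of a kind or two pairs
--             for key in cards_occurencies_dict: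
--                 if cards_occurencies_dict[key] == 3:
--                     return 4
--                 elif cards_occurencies_dict[key] == 2:
--                     return 3
--         case 4:  # can be pair
--             return 2
--         case 5:  # can be high card
--             return 1
--
--     return cards_occurencies_dict
--
-- def get_highest_hand(first_hand, second_hand):
--     # return the highest hand between two hands when they are the same type, who has the higher cards wins
--     for index, card in enumerate(first_hand):
--         if card > second_hand[index]:
--             return first_hand
--         elif card < second_hand[index]:
--             return second_hand
--
-- def get_player_rank_in_game(index, all_players):
--     # return the rank of the player in the game
--     playing_player = all_players[index]
--     player_rank_score = 1
--     playing_player_hand_type = get_hand_type(playing_player[0])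
--     for inner_index, player in enumerate(all_players):
--         if inner_index == index:
--             continue
--         player_hand_type = get_hand_type(player[0])
--         if playing_player_hand_type > player_hand_type:
--             player_rank_score += 1
--         elif playing_player_hand_type == player_hand_type:
--             if get_highest_hand(playing_player[0], player[0]) == playing_player[0]:
--                 player_rank_score += 1
--     return player_rank_score
-- ===== SOURCE B (Python) =====
-- def _key(cards):
--     d = len(set(cards))
--     if d == 1:
--         t = 7
--     elif d == 2:
--         t = 6 if any(cards.count(c) == 4 for c in cards) else 5
--     elif d == 3:
--         t = 4 if any(cards.count(c) == 3 for c in cards) else 3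
--     elif d == 4:
--         t = 2
--     elif d == 5:
--         t = 1
--     else:
--         t = 0
--     return [t] + cards
--
-- def get_player_rank_in_game(index, all_players):
--     # sort every hand's strength key; the rank is the position of our key in that order
--     me = _key(all_players[index][0])
--     ordered = sorted(_key(p[0]) for p in all_players)
--     return ordered.index(me) + 1
-- ===== Notes on version B (the rewrite author's own statement) =====
-- stated objective: alternative
-- what changed: B gives every player a single list-valued strength key ([type] + cards, type read off a set/count classification instead of A's dict scans), sorts all keys once with the built-in sort, and reads the rank off as the position (.index) of the playing player's key in that sorted order, replacing A's per-opponent compare-type-then-run-tiebreaker loop.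
-- outside the precondition, e.g. on get_player_rank_in_game(0, [[[6, 6, 6, 6, 7]], [[9, 9, 9, 1, 1, 1, 1]]]): A returns 2, B returns 1
import Mathlib
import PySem

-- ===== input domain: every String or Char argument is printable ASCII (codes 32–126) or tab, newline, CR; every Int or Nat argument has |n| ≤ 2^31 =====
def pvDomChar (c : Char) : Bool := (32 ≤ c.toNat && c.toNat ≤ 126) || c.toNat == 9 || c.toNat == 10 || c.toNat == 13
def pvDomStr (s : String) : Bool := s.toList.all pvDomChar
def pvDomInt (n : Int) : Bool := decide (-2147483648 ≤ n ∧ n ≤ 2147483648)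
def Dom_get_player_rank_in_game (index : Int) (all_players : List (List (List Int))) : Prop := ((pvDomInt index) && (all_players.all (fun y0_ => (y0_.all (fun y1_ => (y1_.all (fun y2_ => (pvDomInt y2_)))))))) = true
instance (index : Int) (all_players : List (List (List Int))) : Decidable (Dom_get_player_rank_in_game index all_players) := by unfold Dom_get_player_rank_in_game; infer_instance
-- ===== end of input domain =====

-- B replaces A's per-opponent compare-type-then-tiebreak loop by sorting all strength keys once
-- and reading the rank off as the position of our key in the sorted order (objective: alternative).

-- ===== PORT A =====
-- the two early-return loops inside get_hand_type's match (case 2 / case 3);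
-- d[key] lookup is getD (the keys iterated are exactly the dict's keys, so no KeyError)
def get_hand_type_scan2 (d : PySem.Dict Int Int) : List Int → Option Int
  | [] => none
  | k :: ks =>
    if d.getD k 0 = 4 then some 6
    else if d.getD k 0 = 3 then some 5
    else get_hand_type_scan2 d ks

def get_hand_type_scan3 (d : PySem.Dict Int Int) : List Int → Option Int
  | [] => none
  | k :: ks =>
    if d.getD k 0 = 3 then some 4
    else if d.getD k 0 = 2 then some 3
    else get_hand_type_scan3 d ks

-- Python's get_hand_type; `none` is exactly where the Python returns the occurrences dict (a non-int,
-- poisoning the later `>` comparison with a TypeError) — those hands are excluded by Pre_.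
def get_hand_type (cards : List Int) : Option Int :=
  let d : PySem.Dict Int Int :=
    cards.foldl (fun d i => d.insert i ((cards.count i : Int))) PySem.Dict.empty
  match d.size with
  | 1 => some 7
  | 2 => get_hand_type_scan2 d d.keys
  | 3 => get_hand_type_scan3 d d.keys
  | 4 => some 2
  | 5 => some 1
  | _ => none

-- the `for index, card in enumerate(first_hand)` loop; `none` covers Python's `return None`
-- (loop falls through) and the IndexError when second_hand is a strict prefix (excluded by Pre_)
def get_highest_hand_go (f s : List Int) : List Int → List Int → Option (List Int)
  | a :: as, b :: bs =>
    if a > b then some f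
    else if a < b then some s
    else get_highest_hand_go f s as bs
  | _ :: _, [] => none  -- Python raises IndexError here; excluded by Pre_
  | [], _ => none       -- loop ends: Python returns None

def get_highest_hand (first_hand second_hand : List Int) : Option (List Int) :=
  get_highest_hand_go first_hand second_hand first_hand second_hand

-- the loop body of get_player_rank_in_game
def rank_step (index : Int) (pt : Option Int) (myhand : List Int)
    (acc : Int) (ip : Int × List (List Int)) : Int :=
  if ip.1 = index then acc
  else
    match PySem.List.pyGet? ip.2 0 with
    | none => acc  -- player[0] raises IndexError; excluded by Pre_
    | some ph =>
      match pt, get_hand_type ph with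
      | some a, some b =>
        if a > b then acc + 1
        else if a = b then
          if get_highest_hand myhand ph = some myhand then acc + 1 else acc
        else acc
      | _, _ => acc  -- `>` on a dict hand type raises TypeError; excluded by Pre_

def get_player_rank_in_game (index : Int) (all_players : List (List (List Int))) : Int :=
  match PySem.List.pyGet? all_players index with
  | none => 0  -- all_players[index] raises IndexError; excluded by Pre_
  | some playing_player =>
    match PySem.List.pyGet? playing_player 0 with
    | none => 0  -- playing_player[0] raises IndexError; excluded by Pre_
    | some myhand =>
      (PySem.List.enumerate all_players).foldl
        (rank_step index (get_hand_type myhand) myhand) 1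

-- ===== PORT B =====
-- Source B's _key: the strength list [t] + cards (Python's list `<` on int lists is Lean's `<` on List Int)
def key_alt (cards : List Int) : List Int :=
  let d := (PySem.Set.ofList cards).length
  let t : Int :=
    if d = 1 then 7
    else if d = 2 then (if cards.any (fun c => cards.count c == 4) then 6 else 5)
    else if d = 3 then (if cards.any (fun c => cards.count c == 3) then 4 else 3)
    else if d = 4 then 2
    else if d = 5 then 1
    else 0
  t :: cards

def get_player_rank_in_game_alt (index : Int) (all_players : List (List (List Int))) : Int :=
  match PySem.List.pyGet? all_players index with
  | none => 0  -- all_players[index] raises IndexError; excluded by Pre_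
  | some playing =>
    match PySem.List.pyGet? playing 0 with
    | none => 0  -- playing[0] raises IndexError; excluded by Pre_
    | some myhand =>
      let me := key_alt myhand
      let ordered := PySem.List.sorted
        (all_players.map (fun p => key_alt ((PySem.List.pyGet? p 0).getD [])))  -- p[0]: IndexError on an empty player, excluded by Pre_
        (fun k => k) false
      match PySem.List.index? ordered me with
      | some i => (i : Int) + 1
      | none => 0  -- .index ValueError; unreachable: me is one of the sorted keys

-- ===== PRECONDITION & SPEC =====
-- order-insensitive reading of the hand type, used only to phrase Pre_
def pvType (h : List Int) : Int :=
  if (PySem.Set.ofList h).length = 1 then 7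
  else if (PySem.Set.ofList h).length = 2 then (if h.any (fun x => h.count x == 4) then 6 else 5)
  else if (PySem.Set.ofList h).length = 3 then (if h.any (fun x => h.count x == 3) then 4 else 3)
  else if (PySem.Set.ofList h).length = 4 then 2
  else if (PySem.Set.ofList h).length = 5 then 1
  else 0

-- hands on which Python's get_hand_type returns an int that does not depend on dict-iteration
-- (first-occurrence) order
def HandOK (h : List Int) : Prop :=
  (PySem.Set.ofList h).length = 1 ∨ (PySem.Set.ofList h).length = 4 ∨ (PySem.Set.ofList h).length = 5
  ∨ ((PySem.Set.ofList h).length = 2 ∧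
      ((∃ x ∈ h, h.count x = 4) ∨ (∃ x ∈ h, h.count x = 3)) ∧
      ¬((∃ x ∈ h, h.count x = 4) ∧ (∃ x ∈ h, h.count x = 3)))
  ∨ ((PySem.Set.ofList h).length = 3 ∧
      ((∃ x ∈ h, h.count x = 3) ∨ (∃ x ∈ h, h.count x = 2)) ∧
      ¬((∃ x ∈ h, h.count x = 3) ∧ (∃ x ∈ h, h.count x = 2)))

-- Pre_ excludes A's raises (index out of range, an empty player, a hand whose type is not an int —
-- TypeError on `>` — and an opponent hand that is a strict prefix of ours at equal type — IndexError
-- in the tiebreaker), and additionally the hands whose get_hand_type answer depends on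
-- dict-iteration (first-occurrence) order, on which A's returned int is accidental.
def Pre_get_player_rank_in_game (index : Int) (all_players : List (List (List Int))) : Prop :=
  0 < all_players.length ∧
  -(all_players.length : Int) ≤ index ∧ index < (all_players.length : Int) ∧
  (∀ p ∈ all_players, p ≠ []) ∧
  (¬(all_players.length = 1 ∧ index = 0) →
    (∀ p ∈ all_players, HandOK p.headI) ∧
    (∀ p ∈ all_players,
      pvType p.headI = pvType ((PySem.List.pyGet? all_players index).getD []).headI →
      ¬(p.headI.length < ((PySem.List.pyGet? all_players index).getD []).headI.length ∧
        ((PySem.List.pyGet? all_players index).getD []).headI.take p.headI.length = p.headI)))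

instance (index : Int) (all_players : List (List (List Int))) : Decidable (Pre_get_player_rank_in_game index all_players) := by
  unfold Pre_get_player_rank_in_game HandOK; infer_instance

def pvWitness_get_player_rank_in_game : Int × List (List (List Int)) :=
  (0, [[[1, 1, 2, 2, 3]], [[5, 5, 5, 4, 4]]])

def Spec_get_player_rank_in_game (index : Int) (all_players : List (List (List Int))) (out : Int) : Prop := out = get_player_rank_in_game_alt index all_players
instance (index : Int) (all_players : List (List (List Int))) (out : Int) : Decidable (Spec_get_player_rank_in_game index all_players out) := by unfold Spec_get_player_rank_in_game; infer_instance

-- ===== CLAIM (what is proved, stated in full; the proofs are below) =====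
def Claim_equal_get_player_rank_in_game : Prop := ∀ (index : Int) (all_players : List (List (List Int))), Dom_get_player_rank_in_game index all_players → Pre_get_player_rank_in_game index all_players → Spec_get_player_rank_in_game index all_players (get_player_rank_in_game index all_players)

-- ===== LEMMAS AND PROOFS =====

lemma key_alt_eq_pvType (h : List Int) : key_alt h = pvType h :: h := rfl

lemma ghh_go_diag (F S : List Int) : ∀ l, get_highest_hand_go F S l l = none := by
  intro l; induction l with
  | nil => rfl
  | cons a as ih => simp [get_highest_hand_go, ih]

lemma ghh_go_eq (F S : List Int) (hne : F ≠ S) :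
    ∀ as bs : List Int, ¬(bs.length < as.length ∧ as.take bs.length = bs) →
      ((get_highest_hand_go F S as bs = some F) ↔ bs < as) := by
  intro as
  induction as with
  | nil =>
    intro bs _
    cases bs <;> simp [get_highest_hand_go, List.not_lt_nil]
  | cons a as ih =>
    intro bs hpre
    cases bs with
    | nil => exact absurd ⟨by simp, by simp⟩ hpre
    | cons b bs =>
      rw [List.cons_lt_cons_iff]
      by_cases h1 : b < a
      · simp [get_highest_hand_go, h1]
      · by_cases h2 : a < b
        · have : ¬ (b < a ∨ b = a ∧ bs < as) := by
            rintro (hba | ⟨rfl, _⟩) <;> omega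
          simp only [get_highest_hand_go, gt_iff_lt, if_neg h1, if_pos h2, this, iff_false]
          intro hSF
          exact hne (Option.some_inj.mp hSF).symm
        · have hab : a = b := by omega
          subst hab
          have : ¬(bs.length < as.length ∧ as.take bs.length = bs) := by
            intro ⟨hl, ht⟩
            exact hpre ⟨by simpa using hl, by simpa using ht⟩
          have := ih bs this
          simp only [get_highest_hand_go, gt_iff_lt, if_neg h1, this]
          simp

lemma tiebreak_eq (my ph : List Int)
    (hpre : ¬(ph.length < my.length ∧ my.take ph.length = ph)) :
    (get_highest_hand my ph = some my) ↔ ph < my := by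
  by_cases h : ph = my
  · subst h
    simp [get_highest_hand, ghh_go_diag]
  · exact ghh_go_eq my ph (fun hFS => h hFS.symm) my ph hpre

lemma get?_foldl_insert_const (v : Int → Int) :
    ∀ (l : List Int) (d : PySem.Dict Int Int) (k : Int),
      (l.foldl (fun d i => d.insert i (v i)) d).get? k
        = if k ∈ l then some (v k) else d.get? k := by
  intro l
  induction l with
  | nil => simp
  | cons c l ih =>
    intro d k
    simp only [List.foldl_cons, ih]
    by_cases hk : k ∈ l
    · simp [hk]
    · by_cases hkc : k = c
      · subst hkc; simp [hk, PySem.Dict.get?_insert_self]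
      · simp [hk, hkc, PySem.Dict.get?_insert_of_ne _ _ hkc]

lemma rank_step_shift (index : Int) (pt : Option Int) (my : List Int)
    (a : Int) (ip : Int × List (List Int)) :
    rank_step index pt my a ip = a + rank_step index pt my 0 ip := by
  unfold rank_step
  by_cases h1 : ip.1 = index
  · simp [h1]
  · simp only [if_neg h1]
    cases hpg : PySem.List.pyGet? ip.2 0 with
    | none => simp
    | some ph =>
      cases pt with
      | none => simp
      | some x =>
        cases hgt : get_hand_type ph with
        | none => simp [hgt]
        | some b =>
          by_cases h2 : x > b
          · simp [hgt, h2]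
          · by_cases h3 : x = b
            · by_cases h4 : get_highest_hand my ph = some my <;> simp [hgt, h3, h4]
            · simp [hgt, h2, h3]

lemma foldl_shift (F : Int → (Int × List (List Int)) → Int)
    (hF : ∀ a x, F a x = a + F 0 x) :
    ∀ (l : List (Int × List (List Int))) (a : Int),
      l.foldl F a = a + (l.map (F 0)).sum := by
  intro l
  induction l with
  | nil => simp
  | cons x l ih =>
    intro a
    simp only [List.foldl_cons, List.map_cons, List.sum_cons]
    rw [ih, hF a x]
    ring

-- the dict agrees with List.count and has the distinct elements as keys
lemma keys_a_dict (h : List Int) :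
    (h.foldl (fun d i => d.insert i ((h.count i : Int))) PySem.Dict.empty).keys
      = PySem.Set.ofList h := by
  rw [PySem.Dict.keys_foldl_insert]
  simp [PySem.Dict.keys_empty, PySem.Set.update_nil_left]

lemma size_eq_keys_length (d : PySem.Dict Int Int) : d.size = d.keys.length := by
  simp [PySem.Dict.size, PySem.Dict.keys]

lemma getD_a_dict (h : List Int) (k : Int) (hk : k ∈ h) :
    (h.foldl (fun d i => d.insert i ((h.count i : Int))) PySem.Dict.empty).getD k 0
      = (h.count k : Int) := by
  rw [PySem.Dict.getD_eq_get?_getD, get?_foldl_insert_const (fun i => (h.count i : Int))]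
  simp [hk]

lemma scan2_four (d : PySem.Dict Int Int) (cnt : Int → Int) :
    ∀ ks : List Int, (∀ k ∈ ks, d.getD k 0 = cnt k) →
      (∃ k ∈ ks, cnt k = 4) → (∀ k ∈ ks, cnt k ≠ 3) →
      get_hand_type_scan2 d ks = some 6 := by
  intro ks
  induction ks with
  | nil => simp
  | cons k ks ih =>
    intro hc hex hno
    by_cases h4 : cnt k = 4
    · simp [get_hand_type_scan2, hc k (by simp), h4]
    · have hex' : ∃ j ∈ ks, cnt j = 4 := by
        obtain ⟨j, hj, hj4⟩ := hex
        rcases List.mem_cons.mp hj with hj | hj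
        · exact absurd hj4 (by simpa [hj] using h4)
        · exact ⟨j, hj, hj4⟩
      have h3 : cnt k ≠ 3 := hno k (by simp)
      simp only [get_hand_type_scan2, hc k (by simp), if_neg (by simpa using h4), if_neg (by simpa using h3)]
      exact ih (fun j hj => hc j (by simp [hj])) hex' (fun j hj => hno j (by simp [hj]))

lemma scan2_three (d : PySem.Dict Int Int) (cnt : Int → Int) :
    ∀ ks : List Int, (∀ k ∈ ks, d.getD k 0 = cnt k) →
      (∀ k ∈ ks, cnt k ≠ 4) → (∃ k ∈ ks, cnt k = 3) →
      get_hand_type_scan2 d ks = some 5 := by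
  intro ks
  induction ks with
  | nil => simp
  | cons k ks ih =>
    intro hc hno hex
    by_cases h3 : cnt k = 3
    · simp [get_hand_type_scan2, hc k (by simp), h3]
    · have hex' : ∃ j ∈ ks, cnt j = 3 := by
        obtain ⟨j, hj, hj3⟩ := hex
        rcases List.mem_cons.mp hj with hj | hj
        · exact absurd hj3 (by simpa [hj] using h3)
        · exact ⟨j, hj, hj3⟩
      simp only [get_hand_type_scan2, hc k (by simp), if_neg (by simpa using hno k (by simp)), if_neg (by simpa using h3)]
      exact ih (fun j hj => hc j (by simp [hj])) (fun j hj => hno j (by simp [hj])) hex'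

lemma scan3_three (d : PySem.Dict Int Int) (cnt : Int → Int) :
    ∀ ks : List Int, (∀ k ∈ ks, d.getD k 0 = cnt k) →
      (∃ k ∈ ks, cnt k = 3) → (∀ k ∈ ks, cnt k ≠ 2) →
      get_hand_type_scan3 d ks = some 4 := by
  intro ks
  induction ks with
  | nil => simp
  | cons k ks ih =>
    intro hc hex hno
    by_cases h3 : cnt k = 3
    · simp [get_hand_type_scan3, hc k (by simp), h3]
    · have hex' : ∃ j ∈ ks, cnt j = 3 := by
        obtain ⟨j, hj, hj3⟩ := hex
        rcases List.mem_cons.mp hj with hj | hj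
        · exact absurd hj3 (by simpa [hj] using h3)
        · exact ⟨j, hj, hj3⟩
      simp only [get_hand_type_scan3, hc k (by simp), if_neg (by simpa using h3), if_neg (by simpa using hno k (by simp))]
      exact ih (fun j hj => hc j (by simp [hj])) hex' (fun j hj => hno j (by simp [hj]))

lemma scan3_two (d : PySem.Dict Int Int) (cnt : Int → Int) :
    ∀ ks : List Int, (∀ k ∈ ks, d.getD k 0 = cnt k) →
      (∀ k ∈ ks, cnt k ≠ 3) → (∃ k ∈ ks, cnt k = 2) →
      get_hand_type_scan3 d ks = some 3 := by
  intro ks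
  induction ks with
  | nil => simp
  | cons k ks ih =>
    intro hc hno hex
    by_cases h2 : cnt k = 2
    · simp [get_hand_type_scan3, hc k (by simp), h2]
    · have hex' : ∃ j ∈ ks, cnt j = 2 := by
        obtain ⟨j, hj, hj2⟩ := hex
        rcases List.mem_cons.mp hj with hj | hj
        · exact absurd hj2 (by simpa [hj] using h2)
        · exact ⟨j, hj, hj2⟩
      simp only [get_hand_type_scan3, hc k (by simp), if_neg (by simpa using hno k (by simp)), if_neg (by simpa using h2)]
      exact ih (fun j hj => hc j (by simp [hj])) (fun j hj => hno j (by simp [hj])) hex'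

def aDict (h : List Int) : PySem.Dict Int Int :=
  h.foldl (fun d i => d.insert i ((h.count i : Int))) PySem.Dict.empty

lemma get_hand_type_def (h : List Int) : get_hand_type h =
    match (aDict h).size with
    | 1 => some 7
    | 2 => get_hand_type_scan2 (aDict h) (aDict h).keys
    | 3 => get_hand_type_scan3 (aDict h) (aDict h).keys
    | 4 => some 2
    | 5 => some 1
    | _ => none := rfl

lemma get_hand_type_eq (h : List Int) (hOK : HandOK h) :
    get_hand_type h = some (pvType h) := by
  have hkeys : (aDict h).keys = PySem.Set.ofList h := keys_a_dict h
  have hsize : (aDict h).size = (PySem.Set.ofList h).length := by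
    rw [size_eq_keys_length, hkeys]
  have hc : ∀ k ∈ (aDict h).keys, (aDict h).getD k 0 = (h.count k : Int) := by
    intro k hk
    exact getD_a_dict h k (by rw [hkeys] at hk; exact (PySem.Set.mem_ofList h k).mp hk)
  have hmemk : ∀ x ∈ h, x ∈ (aDict h).keys := by
    intro x hx; rw [hkeys]; exact (PySem.Set.mem_ofList h x).mpr hx
  rcases hOK with hd | hd | hd | ⟨hd, hor, hnand⟩ | ⟨hd, hor, hnand⟩
  · rw [get_hand_type_def, hsize, hd]; simp [pvType, hd]
  · rw [get_hand_type_def, hsize, hd]; simp [pvType, hd]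
  · rw [get_hand_type_def, hsize, hd]; simp [pvType, hd]
  · rw [get_hand_type_def, hsize, hd]
    by_cases hh4 : ∃ x ∈ h, h.count x = 4
    · have hno3 : ¬ ∃ x ∈ h, h.count x = 3 := fun h3 => hnand ⟨hh4, h3⟩
      obtain ⟨w, hw, hw4⟩ := hh4
      have hscan := scan2_four (aDict h) (fun k => (h.count k : Int)) (aDict h).keys hc
        ⟨w, hmemk w hw, by simp [hw4]⟩
        (by
          intro k hk hc3
          refine hno3 ⟨k, (by rw [hkeys] at hk; exact (PySem.Set.mem_ofList h k).mp hk), ?_⟩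
          have hq : (h.count k : Int) = 3 := hc3
          omega)
      have hany : h.any (fun x => h.count x == 4) = true :=
        List.any_eq_true.mpr ⟨w, hw, by simp [hw4]⟩
      rw [hscan]; simp [pvType, hd, hany]
    · have hh3 : ∃ x ∈ h, h.count x = 3 := hor.resolve_left hh4
      obtain ⟨w, hw, hw3⟩ := hh3
      have hscan := scan2_three (aDict h) (fun k => (h.count k : Int)) (aDict h).keys hc
        (by
          intro k hk hc4
          refine absurd ⟨k, (by rw [hkeys] at hk; exact (PySem.Set.mem_ofList h k).mp hk), ?_⟩ hh4
          have hq : (h.count k : Int) = 4 := hc4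
          omega)
        ⟨w, hmemk w hw, by simp [hw3]⟩
      have hany : h.any (fun x => h.count x == 4) = false := by
        rw [List.any_eq_false]
        intro x hx
        simp only [beq_iff_eq]
        exact fun hc4 => hh4 ⟨x, hx, hc4⟩
      rw [hscan]; simp [pvType, hd, hany]
  · rw [get_hand_type_def, hsize, hd]
    by_cases hh3 : ∃ x ∈ h, h.count x = 3
    · have hno2 : ¬ ∃ x ∈ h, h.count x = 2 := fun h2 => hnand ⟨hh3, h2⟩
      obtain ⟨w, hw, hw3⟩ := hh3
      have hscan := scan3_three (aDict h) (fun k => (h.count k : Int)) (aDict h).keys hc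
        ⟨w, hmemk w hw, by simp [hw3]⟩
        (by
          intro k hk hc2
          refine hno2 ⟨k, (by rw [hkeys] at hk; exact (PySem.Set.mem_ofList h k).mp hk), ?_⟩
          have hq : (h.count k : Int) = 2 := hc2
          omega)
      have hany : h.any (fun x => h.count x == 3) = true :=
        List.any_eq_true.mpr ⟨w, hw, by simp [hw3]⟩
      rw [hscan]; simp [pvType, hd, hany]
    · have hh2 : ∃ x ∈ h, h.count x = 2 := hor.resolve_left hh3
      obtain ⟨w, hw, hw2⟩ := hh2
      have hscan := scan3_two (aDict h) (fun k => (h.count k : Int)) (aDict h).keys hc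
        (by
          intro k hk hc3
          refine absurd ⟨k, (by rw [hkeys] at hk; exact (PySem.Set.mem_ofList h k).mp hk), ?_⟩ hh3
          have hq : (h.count k : Int) = 3 := hc3
          omega)
        ⟨w, hmemk w hw, by simp [hw2]⟩
      have hany : h.any (fun x => h.count x == 3) = false := by
        rw [List.any_eq_false]
        intro x hx
        simp only [beq_iff_eq]
        exact fun hc3 => hh3 ⟨x, hx, hc3⟩
      rw [hscan]; simp [pvType, hd, hany]

-- the two DecidableLT instances on List ℤ decide the same (defeq) order
lemma sorted_pw (xs : List (List Int)) :
    (PySem.List.sorted xs (fun k => k) false).Pairwise (fun a b => a ≤ b) := by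
  have h := PySem.List.sorted_pairwise (κ := List ℤ) xs (fun k => k)
  rw [show (LinearOrder.toDecidableLT (α := List ℤ)) = (fun (a b : List ℤ) => a.decidableLT b)
      from Subsingleton.elim _ _] at h
  exact h

lemma sorted_perm' (xs : List (List Int)) :
    (PySem.List.sorted xs (fun k => k) false).Perm xs :=
  PySem.List.sorted_perm xs (fun k => k) false

-- in a ≤-sorted list, .index of a member is the number of strictly smaller elements
lemma index?_sorted_eq (me : List Int) :
    ∀ s : List (List Int), s.Pairwise (fun a b => a ≤ b) → me ∈ s →
      PySem.List.index? s me = some (s.countP (fun k => decide (k < me))) := by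
  intro s
  induction s with
  | nil => intro _ h; simp at h
  | cons y ys ih =>
    intro hpw hmem
    have hy : ∀ k ∈ ys, y ≤ k := (List.pairwise_cons.mp hpw).1
    by_cases hxy : y = me
    · subst hxy
      have hz : ys.countP (fun k => decide (k < y)) = 0 := by
        rw [List.countP_eq_zero]
        intro k hk
        simpa using not_lt.mpr (hy k hk)
      simp [PySem.List.index?, List.idxOf?_cons, hz]
    · have hmem' : me ∈ ys := by
        rcases List.mem_cons.mp hmem with h | h
        · exact absurd h.symm hxy
        · exact h
      have hlt : y < me := lt_of_le_of_ne (hy me hmem') hxy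
      have := ih (List.pairwise_cons.mp hpw).2 hmem'
      simp only [PySem.List.index?] at this ⊢
      simp [List.idxOf?_cons, hxy, this, hlt]

-- ===== VERDICT (by name: the statement is the Claim_ definition above) =====
theorem get_player_rank_in_game_spec : Claim_equal_get_player_rank_in_game := by
  intro index aps _ hpre
  unfold Spec_get_player_rank_in_game
  obtain ⟨hn, hlo, hhi, hnem, hrest⟩ := hpre
  obtain ⟨playing, hg⟩ : ∃ p, PySem.List.pyGet? aps index = some p := by
    cases hq : PySem.List.pyGet? aps index with
    | some p => exact ⟨p, rfl⟩
    | none =>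
      have := (PySem.List.pyGet?_eq_none_iff aps index).mp hq
      exact absurd ⟨hlo, hhi⟩ this
  have hpm : playing ∈ aps := PySem.List.mem_of_pyGet?_eq_some aps hg
  obtain ⟨x, xs, rfl⟩ : ∃ y ys, playing = y :: ys := by
    cases hpl : playing with
    | nil => exact absurd hpl (hnem _ hpm)
    | cons y ys => exact ⟨y, ys, rfl⟩
  by_cases hone : aps.length = 1 ∧ index = 0
  · obtain ⟨hl1, hi0⟩ := hone
    obtain ⟨p, rfl⟩ := List.length_eq_one_iff.mp hl1
    subst hi0
    have hpx : p = x :: xs := by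
      rw [PySem.List.pyGet?_zero_cons p []] at hg
      exact Option.some_inj.mp hg
    subst hpx
    have hs1 : PySem.List.sorted [key_alt x] (fun k => k) false = [key_alt x] := rfl
    simp [get_player_rank_in_game, get_player_rank_in_game_alt,
      PySem.List.enumerate_cons, PySem.List.enumerate_nil, rank_step,
      PySem.List.index?, hs1, List.idxOf?_cons]
  · obtain ⟨hOK, htie⟩ := hrest hone
    have hOKx : HandOK x := by simpa using hOK _ hpm
    have hgtx : get_hand_type x = some (pvType x) := get_hand_type_eq x hOKx
    simp only [get_player_rank_in_game, get_player_rank_in_game_alt, hg,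
      PySem.List.pyGet?_zero_cons]
    rw [foldl_shift _ (rank_step_shift index (get_hand_type x) x)]
    -- pointwise: each loop entry is the 0/1 indicator of "that player's key is below ours"
    have hpoint : ∀ ip ∈ PySem.List.enumerate aps 0,
        rank_step index (get_hand_type x) x 0 ip
          = (fun q : List (List Int) =>
              if decide (key_alt ((PySem.List.pyGet? q 0).getD []) < key_alt x)
              then (1:Int) else 0) ip.2 := by
      intro ip hip
      obtain ⟨k, hk, rfl⟩ := (PySem.List.mem_enumerate_iff aps 0 _).mp hip
      simp only [zero_add]
      by_cases hski : ((k : Nat) : Int) = index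
      · have hix : aps[k] = x :: xs := by
          rw [PySem.List.pyGet?_of_nonneg aps (by omega : (0:Int) ≤ index)] at hg
          have hkn : index.toNat = k := by omega
          rw [hkn, List.getElem?_eq_getElem hk] at hg
          exact Option.some_inj.mp hg
        simp [rank_step, hski, hix]
      · have hmem : aps[k] ∈ aps := List.getElem_mem hk
        have hne2 : aps[k] ≠ [] := hnem _ hmem
        obtain ⟨y, ys, hys⟩ : ∃ y ys, aps[k] = y :: ys := by
          cases hq2 : aps[k] with
          | nil => exact absurd hq2 hne2
          | cons y ys => exact ⟨y, ys, rfl⟩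
        have hOKy : HandOK y := by
          have := hOK _ hmem
          rw [hys] at this
          simpa using this
        have hgty : get_hand_type y = some (pvType y) := get_hand_type_eq y hOKy
        have htie' : pvType y = pvType x → ¬(y.length < x.length ∧ x.take y.length = y) := by
          intro hty
          have hh := htie _ hmem
          rw [hys, hg] at hh
          simp only [Option.getD_some, List.headI_cons] at hh
          exact hh hty
        simp only [rank_step, if_neg hski, hys, PySem.List.pyGet?_zero_cons, hgtx, hgty,
          Option.getD_some, key_alt_eq_pvType, List.cons_lt_cons_iff]
        rcases lt_trichotomy (pvType x) (pvType y) with hlt | heq | hgt2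
        · have h1 : ¬ pvType y < pvType x := by omega
          have hxy : pvType x ≠ pvType y := by omega
          have hyx : ¬ (pvType y = pvType x ∧ y < x) := by rintro ⟨h, _⟩; omega
          simp [gt_iff_lt, h1, hxy, hyx]
        · have h1 : ¬ pvType y < pvType x := by omega
          have hiff := tiebreak_eq x y (htie' heq.symm)
          by_cases hb : y < x
          · simp [gt_iff_lt, heq, hiff.mpr hb, hb]
          · have hng : ¬ get_highest_hand x y = some x := fun hgg => hb (hiff.mp hgg)
            simp [gt_iff_lt, heq, hng, hb]
        · have h2 : pvType y < pvType x ∨ pvType y = pvType x ∧ y < x := Or.inl hgt2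
          simp [gt_iff_lt, hgt2]
    rw [List.map_congr_left hpoint]
    have hmm : (PySem.List.enumerate aps 0).map
        (fun ip : Int × List (List Int) =>
          (fun q : List (List Int) =>
            if decide (key_alt ((PySem.List.pyGet? q 0).getD []) < key_alt x)
            then (1:Int) else 0) ip.2)
        = aps.map (fun q : List (List Int) =>
            if decide (key_alt ((PySem.List.pyGet? q 0).getD []) < key_alt x)
            then (1:Int) else 0) := by
      conv_rhs => rw [← PySem.List.map_snd_enumerate aps 0]
      rw [List.map_map]
      rfl
    rw [hmm, PySem.List.sum_map_ite_one_zero]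
    -- B's side: position of our key in the sorted key list = count of strictly smaller keys
    have hmemme : key_alt x ∈ aps.map (fun p => key_alt ((PySem.List.pyGet? p 0).getD [])) := by
      refine List.mem_map.mpr ⟨x :: xs, hpm, ?_⟩
      simp
    have hidx := index?_sorted_eq (key_alt x) _
      (sorted_pw (aps.map (fun p => key_alt ((PySem.List.pyGet? p 0).getD []))))
      ((PySem.List.mem_sorted _ _ _ _).mpr hmemme)
    rw [hidx]
    rw [(sorted_perm' (aps.map (fun p => key_alt ((PySem.List.pyGet? p 0).getD [])))).countP_eq]
    rw [List.countP_map]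
    have : ((fun k => decide (k < key_alt x)) ∘ fun p => key_alt ((PySem.List.pyGet? p 0).getD []))
        = fun q => decide (key_alt ((PySem.List.pyGet? q 0).getD []) < key_alt x) := rfl
    rw [this]
    have hmatch : ∀ c : Nat, (match (some c : Option Nat) with
        | some i => ((i : Int) + 1) | none => (0 : Int)) = (c : Int) + 1 := fun _ => rfl
    rw [hmatch]
    omega
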